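-- pv_equiv track=rewrite | github.com/ThuraAung1601/python_practice | homework13/no3.py | perm2
-- ===== SOURCE A (Python) =====
-- def perm2(t, i=0, j=0, result=""):
--     if i == len(t):
--         return result
--     if j == len(t):
--         return perm2(t, i + 1, 0, result)
--     if t[i] != t[j]:
--         result += f"({t[i]}, {t[j]})"
--     return perm2(t, i, j + 1, result)
-- ===== SOURCE B (Python) =====
-- def perm2(t, i=0, j=0, result=""):
--     # Iterative rewrite: finish the current row i from column j, then sweep the
--     # remaining rows in full with nested loops, concatenating pieces directly.
--     n = len(t)
--     if i == n:
--         return result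
--     out = result
--     for k in range(j, n):
--         if t[i] != t[k]:
--             out += f"({t[i]}, {t[k]})"
--     for r in range(i + 1, n):
--         for k in range(n):
--             if t[r] != t[k]:
--                 out += f"({t[r]}, {t[k]})"
--     return out
-- ===== Notes on version B (the rewrite author's own statement) =====
-- stated objective: simpler
-- what changed: Replaces A's one-cell-per-call tail recursion with accumulator threading by explicit nested loops over the same ordered pair space that concatenate the pieces in place.
import Mathlib
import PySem

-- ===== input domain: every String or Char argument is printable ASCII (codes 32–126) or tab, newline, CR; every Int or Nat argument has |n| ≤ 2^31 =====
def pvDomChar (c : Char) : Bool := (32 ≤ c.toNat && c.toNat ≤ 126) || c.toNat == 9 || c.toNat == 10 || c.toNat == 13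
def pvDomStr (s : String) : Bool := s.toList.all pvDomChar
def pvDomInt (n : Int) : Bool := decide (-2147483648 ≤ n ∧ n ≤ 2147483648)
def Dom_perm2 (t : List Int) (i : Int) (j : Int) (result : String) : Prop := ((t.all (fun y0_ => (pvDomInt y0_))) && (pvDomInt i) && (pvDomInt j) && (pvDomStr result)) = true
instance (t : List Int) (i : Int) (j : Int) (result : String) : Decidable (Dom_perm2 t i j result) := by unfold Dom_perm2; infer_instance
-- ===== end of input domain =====

-- B replaces A's one-cell-per-call tail recursion by explicit nested loops that
-- build the string in place (objective: simpler).

-- the f-string piece f"({t[a]}, {t[b]})"; pyGetD is safe: Pre_ keeps all accessed indices in range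
def pvPiece (t : List Int) (a : Int) (b : Int) : String :=
  "(" ++ PySem.Int.toStr (PySem.List.pyGetD t a 0) ++ ", " ++ PySem.Int.toStr (PySem.List.pyGetD t b 0) ++ ")"

-- ===== PORT A =====
-- A's tail recursion, made total with a fuel that dominates the number of calls on Pre_
def perm2Go (t : List Int) (i : Int) (j : Int) (result : String) : Nat → String
  | 0 => result
  | Nat.succ fuel =>
    if i = PySem.List.len t then result
    else if j = PySem.List.len t then perm2Go t (i + 1) 0 result fuel
    else
      perm2Go t i (j + 1)
        (if PySem.List.pyGetD t i 0 ≠ PySem.List.pyGetD t j 0 then result ++ pvPiece t i j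
         else result) fuel

def perm2 (t : List Int) (i : Int) (j : Int) (result : String) : String :=
  perm2Go t i j result
    ((PySem.List.len t - i).toNat * (t.length + 1) + (PySem.List.len t - j).toNat + 1)

-- ===== PORT B =====
def perm2_alt (t : List Int) (i : Int) (j : Int) (result : String) : String :=
  let n : Int := PySem.List.len t
  if i = n then result
  else
    let out := (PySem.List.pyRange j n 1).foldl
      (fun acc k =>
        if PySem.List.pyGetD t i 0 ≠ PySem.List.pyGetD t k 0 then acc ++ pvPiece t i k else acc)
      result
    let out := (PySem.List.pyRange (i + 1) n 1).foldl
      (fun acc r => (PySem.List.pyRange 0 n 1).foldl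
        (fun acc2 k =>
          if PySem.List.pyGetD t r 0 ≠ PySem.List.pyGetD t k 0 then acc2 ++ pvPiece t r k
          else acc2)
        acc)
      out
    out

-- ===== PRECONDITION & SPEC =====
-- Pre_ admits exactly the inputs on which Python A returns: it excludes only inputs where A
-- raises -- out-of-range i/j (IndexError) and i > len(t) (unbounded recursion).
def Pre_perm2 (t : List Int) (i : Int) (j : Int) (result : String) : Prop :=
  i ≤ (t.length : Int) ∧
    (i = (t.length : Int) ∨
      (j = (t.length : Int) ∧ (-(t.length : Int) - 1 ≤ i ∨ (t.length : Int) = 0)) ∨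
      (j < (t.length : Int) ∧ -(t.length : Int) ≤ j ∧ -(t.length : Int) ≤ i))
instance (t : List Int) (i : Int) (j : Int) (result : String) : Decidable (Pre_perm2 t i j result) := by
  unfold Pre_perm2; infer_instance

def pvWitness_perm2 : List Int × Int × Int × String := ([1, 2, 1], 0, 0, "")

def Spec_perm2 (t : List Int) (i : Int) (j : Int) (result : String) (out : String) : Prop :=
  out = perm2_alt t i j result
instance (t : List Int) (i : Int) (j : Int) (result : String) (out : String) : Decidable (Spec_perm2 t i j result out) := by
  unfold Spec_perm2; infer_instance

-- ===== CLAIM (what is proved, stated in full; the proofs are below) =====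
def Claim_equal_perm2 : Prop := ∀ (t : List Int) (i : Int) (j : Int) (result : String),
  Dom_perm2 t i j result → Pre_perm2 t i j result → Spec_perm2 t i j result (perm2 t i j result)

-- ===== LEMMAS AND PROOFS =====

lemma perm2Go_stop (t : List Int) (i j : Int) (result : String) (fuel : Nat)
    (hf : 1 ≤ fuel) (hi : i = (t.length : Int)) :
    perm2Go t i j result fuel = result := by
  cases fuel with
  | zero => omega
  | succ f => simp [perm2Go, PySem.List.len_eq, hi]

-- B's body is unchanged when A consumes one cell of the current row
lemma alt_step_cell (t : List Int) (i j : Int) (result : String)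
    (hi : i < (t.length : Int)) (hj : j < (t.length : Int)) :
    perm2_alt t i j result =
      perm2_alt t i (j + 1)
        (if PySem.List.pyGetD t i 0 ≠ PySem.List.pyGetD t j 0 then result ++ pvPiece t i j
         else result) := by
  unfold perm2_alt
  simp only [PySem.List.len_eq]
  rw [if_neg (by omega), if_neg (by omega), PySem.List.pyRange_one_cons hj]
  simp [List.foldl]

-- B's body is unchanged when A moves to the next row
lemma alt_step_row (t : List Int) (i : Int) (result : String)
    (hi : i < (t.length : Int)) (hi1 : i + 1 < (t.length : Int)) :
    perm2_alt t i (t.length : Int) result = perm2_alt t (i + 1) 0 result := by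
  unfold perm2_alt
  simp only [PySem.List.len_eq]
  rw [if_neg (by omega), if_neg (by omega),
    PySem.List.pyRange_one_eq_nil (le_refl (t.length : Int)),
    PySem.List.pyRange_one_cons hi1]
  simp [List.foldl]

-- B's body at the last row, column len(t): nothing left to add
lemma alt_last (t : List Int) (i : Int) (result : String)
    (hi : i < (t.length : Int)) (hi1 : i + 1 = (t.length : Int)) :
    perm2_alt t i (t.length : Int) result = result := by
  unfold perm2_alt
  simp only [PySem.List.len_eq]
  rw [if_neg (by omega), PySem.List.pyRange_one_eq_nil (le_refl (t.length : Int)), hi1,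
    PySem.List.pyRange_one_eq_nil (le_refl (t.length : Int))]
  simp

lemma perm2Go_eq_alt (t : List Int) : ∀ (fuel : Nat) (i j : Int) (result : String),
    i < (t.length : Int) → j ≤ (t.length : Int) →
    ((t.length : Int) - i).toNat * (t.length + 1) + ((t.length : Int) - j).toNat + 1 ≤ fuel →
    perm2Go t i j result fuel = perm2_alt t i j result := by
  intro fuel
  induction fuel with
  | zero => intro i j result _ _ hf; omega
  | succ f ih =>
    intro i j result hi hj hf
    have hiN : ¬ i = (t.length : Int) := by omega
    by_cases hjN : j = (t.length : Int)
    · have hstep : perm2Go t i j result (f + 1) = perm2Go t (i + 1) 0 result f := by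
        simp [perm2Go, PySem.List.len_eq, hjN, hiN]
      by_cases hi1 : i + 1 = (t.length : Int)
      · rw [hstep, perm2Go_stop t (i + 1) 0 result f (by nlinarith [Int.toNat_of_nonneg (by omega : (0:Int) ≤ (t.length : Int) - i)]) hi1,
          hjN, alt_last t i result hi hi1]
      · have h1 : ((t.length : Int) - i).toNat = ((t.length : Int) - (i + 1)).toNat + 1 := by omega
        rw [hstep, ih (i + 1) 0 result (by omega) (by omega) (by
          have h2 : ((t.length : Int) - 0).toNat = t.length := by omega
          nlinarith [hf, h1, h2]), hjN, alt_step_row t i result hi (by omega)]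
    · have hjlt : j < (t.length : Int) := by omega
      have hstep : perm2Go t i j result (f + 1) =
          perm2Go t i (j + 1)
            (if PySem.List.pyGetD t i 0 ≠ PySem.List.pyGetD t j 0 then result ++ pvPiece t i j
             else result) f := by
        simp [perm2Go, PySem.List.len_eq, hjN, hiN]
      rw [hstep, ih i (j + 1) _ hi (by omega) (by omega), alt_step_cell t i j result hi hjlt]

-- ===== VERDICT (by name: the statement is the Claim_ definition above) =====
theorem perm2_spec : Claim_equal_perm2 := by
  intro t i j result _ hpre
  unfold Spec_perm2 perm2
  simp only [PySem.List.len_eq]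
  obtain ⟨hile, hcases⟩ := hpre
  by_cases hiN : i = (t.length : Int)
  · rw [perm2Go_stop t i j result _ (by omega) hiN]
    unfold perm2_alt
    simp [PySem.List.len_eq, hiN]
  · have hi : i < (t.length : Int) := by omega
    have hj : j ≤ (t.length : Int) := by
      rcases hcases with h | h | h
      · omega
      · omega
      · omega
    exact perm2Go_eq_alt t _ i j result hi hj (le_refl _)
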